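-- pv_equiv track=rewrite | github.com/SGKFPS/linprog | createHeatmap.py | convert_tp_to_time
-- ===== SOURCE A (Python) =====
-- def convert_tp_to_time(timeperiods):
-- 	hour = 0
-- 	deciminute = 3
-- 	convertedHours = []
--
-- 	for i in range(len(timeperiods)):
-- 		if i % 2 == 0:
-- 			deciminute = 3
-- 		else:
-- 			deciminute = 0
-- 		if i % 2 == 1:
-- 			hour += 1
--
-- 		if hour < 10:
-- 			temp = "0"+str(hour)+":"+str(deciminute)+"0"
-- 		elif hour >= 10 and hour < 24:
-- 			temp = str(hour)+":"+str(deciminute)+"0"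
-- 		elif hour == 24:
-- 			hour = 0
-- 			temp = "0"+str(hour)+":"+str(deciminute)+"0"
--
-- 		convertedHours.append(temp)
--
-- 	return convertedHours
-- ===== SOURCE B (Python) =====
-- def convert_tp_to_time(timeperiods):
--     return [f"{((i + 1) // 2) % 24:02d}:{'30' if i % 2 == 0 else '00'}"
--             for i in range(len(timeperiods))]
-- ===== Notes on version B (the rewrite author's own statement) =====
-- stated objective: simpler
-- what changed: Replaces A's stateful loop (carried hour counter, per-iteration deciminute reset and three-way pad/wrap if-chain) with a single list comprehension computing each entry in closed form: hour = ((i+1)//2) % 24 and minutes '30'/'00' by parity, formatted with f"{hour:02d}".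
import Mathlib
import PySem

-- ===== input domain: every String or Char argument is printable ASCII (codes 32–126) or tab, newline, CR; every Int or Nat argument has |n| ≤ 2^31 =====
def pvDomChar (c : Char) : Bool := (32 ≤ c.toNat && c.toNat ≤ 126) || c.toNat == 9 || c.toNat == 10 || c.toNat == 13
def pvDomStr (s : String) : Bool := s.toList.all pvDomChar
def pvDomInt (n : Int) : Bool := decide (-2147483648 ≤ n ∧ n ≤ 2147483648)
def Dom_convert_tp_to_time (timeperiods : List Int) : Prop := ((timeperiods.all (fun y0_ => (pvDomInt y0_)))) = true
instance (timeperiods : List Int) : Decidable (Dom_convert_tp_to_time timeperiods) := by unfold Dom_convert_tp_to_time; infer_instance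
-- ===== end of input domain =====

-- B replaces A's stateful hour counter and three-way reset branch by a closed-form
-- per-index computation ((i+1)//2) % 24 (objective: simpler; no speed claim).

-- ===== PORT A =====
-- one iteration of A's loop body: takes the carried hour and the index i, returns (new hour, temp)
def aStep (hour : Int) (i : Int) : Int × String :=
  let deciminute : Int := if PySem.Int.mod i 2 = 0 then 3 else 0
  let hour' : Int := if PySem.Int.mod i 2 = 1 then hour + 1 else hour
  if hour' < 10 then (hour', "0" ++ PySem.Int.toStr hour' ++ ":" ++ PySem.Int.toStr deciminute ++ "0")
  else if 10 ≤ hour' ∧ hour' < 24 then (hour', PySem.Int.toStr hour' ++ ":" ++ PySem.Int.toStr deciminute ++ "0")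
  else if hour' = 24 then ((0 : Int), "0" ++ PySem.Int.toStr (0 : Int) ++ ":" ++ PySem.Int.toStr deciminute ++ "0")
  else (hour', "")  -- unreachable in A (hour stays in [0,24]); Python would raise NameError here

def convert_tp_to_time (timeperiods : List Int) : List String :=
  ((PySem.List.pyRange 0 (timeperiods.length : Int) 1).foldl
    (fun st i => let r := aStep st.1 i; (r.1, st.2 ++ [r.2])) ((0 : Int), ([] : List String))).2

-- ===== PORT B =====
-- B's per-index format: hour = ((i+1)//2) % 24, minutes = '30' if i even else '00';
-- f"{hour:02d}" ported by hand (exact for 0 ≤ hour < 100)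
def bFmt (i : Int) : String :=
  let hour := PySem.Int.mod (PySem.Int.floordiv (i + 1) 2) 24
  let minutes := if PySem.Int.mod i 2 = 0 then "30" else "00"
  (if hour < 10 then "0" ++ PySem.Int.toStr hour else PySem.Int.toStr hour) ++ ":" ++ minutes

def convert_tp_to_time_alt (timeperiods : List Int) : List String :=
  (PySem.List.pyRange 0 (timeperiods.length : Int) 1).map bFmt

-- ===== PRECONDITION & SPEC =====
def Spec_convert_tp_to_time (timeperiods : List Int) (out : List String) : Prop := out = convert_tp_to_time_alt timeperiods
instance (timeperiods : List Int) (out : List String) : Decidable (Spec_convert_tp_to_time timeperiods out) := by unfold Spec_convert_tp_to_time; infer_instance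

-- ===== CLAIM (what is proved, stated in full; the proofs are below) =====
def Claim_equal_convert_tp_to_time : Prop := ∀ (timeperiods : List Int), Dom_convert_tp_to_time timeperiods → Spec_convert_tp_to_time timeperiods (convert_tp_to_time timeperiods)

-- ===== LEMMAS AND PROOFS =====

-- one step of A's loop, started from the closed-form hour, produces B's string and the next closed-form hour
lemma aStep_closed (i : Int) :
    aStep (PySem.Int.mod (PySem.Int.floordiv i 2) 24) i
      = (PySem.Int.mod (PySem.Int.floordiv (i + 1) 2) 24, bFmt i) := by
  have e1 : PySem.Int.floordiv i 2 = i / 2 := PySem.Int.floordiv_eq_ediv_of_pos (by norm_num)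
  have e2 : PySem.Int.floordiv (i+1) 2 = (i+1) / 2 := PySem.Int.floordiv_eq_ediv_of_pos (by norm_num)
  have e3 : ∀ x : Int, PySem.Int.mod x 24 = x % 24 := fun x => PySem.Int.mod_eq_emod_of_pos (by norm_num)
  have e4 : PySem.Int.mod i 2 = i % 2 := PySem.Int.mod_eq_emod_of_pos (by norm_num)
  rcases Int.emod_two_eq i with hp | hp
  · -- i even: the hour is unchanged and equals ((i+1)//2) % 24
    have hq : (i+1) / 2 = i / 2 := by omega
    obtain ⟨g, hg0, hg24, hgeq⟩ : ∃ g, 0 ≤ g ∧ g < 24 ∧ i / 2 % 24 = g :=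
      ⟨_, by omega, by omega, rfl⟩
    simp only [aStep, bFmt, e1, e2, e3, e4, hp, hq, hgeq]
    norm_num
    interval_cases g <;> decide
  · -- i odd: the hour is incremented (with the 24 → 0 reset) and equals ((i+1)//2) % 24
    have hq : (i+1) / 2 = i / 2 + 1 := by omega
    obtain ⟨g, hg0, hg24, hgeq⟩ : ∃ g, 0 ≤ g ∧ g < 24 ∧ i / 2 % 24 = g :=
      ⟨_, by omega, by omega, rfl⟩
    have hB : (i / 2 + 1) % 24 = if g = 23 then 0 else g + 1 := by
      rw [← hgeq]; split_ifs <;> omega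
    simp only [aStep, bFmt, e1, e2, e3, e4, hp, hq, hB, hgeq]
    norm_num
    interval_cases g <;> norm_num <;> decide

-- loop invariant: after the indices 0..n-1, A's state is the closed-form hour and B's strings
lemma loop_inv (n : Nat) :
    (PySem.List.pyRange 0 (n : Int) 1).foldl
        (fun st i => let r := aStep st.1 i; (r.1, st.2 ++ [r.2])) ((0 : Int), ([] : List String))
      = (PySem.Int.mod (PySem.Int.floordiv (n : Int) 2) 24,
         (PySem.List.pyRange 0 (n : Int) 1).map bFmt) := by
  induction n with
  | zero => decide
  | succ m ih =>
      have hr : PySem.List.pyRange 0 ((m + 1 : Nat) : Int) 1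
          = PySem.List.pyRange 0 (m : Int) 1 ++ [(m : Int)] := by
        push_cast
        exact PySem.List.pyRange_one_succ_right (by positivity)
      rw [hr, List.foldl_append, ih, List.map_append]
      simp only [List.foldl, List.map]
      rw [aStep_closed]
      push_cast
      ring_nf

theorem convert_tp_to_time_spec : Claim_equal_convert_tp_to_time := by
  intro timeperiods _
  unfold Spec_convert_tp_to_time convert_tp_to_time convert_tp_to_time_alt
  rw [loop_inv]
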